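-- pv_equiv track=rewrite | github.com/lyanks/lab2_dyscr | lab.py | iterative_adjacency_matrix_dfs
-- ===== SOURCE A (Python) =====
-- def iterative_adjacency_matrix_dfs(graph: list[list[int]], start: int) -> list[int]:
--     """
--     :param list[list[int]] graph: the adjacency matrix of a given graph
--     :param int start: start vertex of search
--     :returns list[int]: the dfs traversal of the graph
--     >>> iterative_adjacency_matrix_dfs([[0, 1, 1], [1, 0, 1], [1, 1, 0]], 0)
--     [0, 1, 2]
--     >>> iterative_adjacency_matrix_dfs([[0, 1, 1, 0], [1, 0, 1, 1], [1, 1, 0, 0], [0, 0, 0, 0]], 0)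
--     [0, 1, 2, 3]
--     """
--     visited = set()
--     stack = [start]
--     result = []
--     n = len(graph)
--
--     while stack:
--         v = stack.pop()
--         if v not in visited:
--             visited.add(v)
--             result.append(v)
--
--             for u in range(n):
--                 if graph[v][u] == 1 and u not in visited:
--                     stack.append(u)
--
--     return sorted(result)
-- ===== SOURCE B (Python) =====
-- def iterative_adjacency_matrix_dfs(graph: list[list[int]], start: int) -> list[int]:
--     """Reachable vertices from start, as a sorted list, computed by n rounds of
--     one-step set expansion (bounded fixed-point iteration) instead of an explicit
--     DFS stack."""
--     n = len(graph)
--     visited = {start}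
--     for _ in range(n):
--         visited = visited | {u for v in visited for u in range(n) if graph[v][u] == 1}
--     return sorted(visited)
-- ===== Notes on version B (the rewrite author's own statement) =====
-- stated objective: alternative
-- what changed: Replaced the explicit-stack DFS that appends to a result list with a bounded fixed-point iteration: n rounds of one-step neighbour-set expansion of the reachable set, then sorted; no stack, no per-vertex visit order.
-- outside the precondition, e.g. on iterative_adjacency_matrix_dfs([[0, 0], [1]], 0): A returns [0], B returns [0]
import Mathlib
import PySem

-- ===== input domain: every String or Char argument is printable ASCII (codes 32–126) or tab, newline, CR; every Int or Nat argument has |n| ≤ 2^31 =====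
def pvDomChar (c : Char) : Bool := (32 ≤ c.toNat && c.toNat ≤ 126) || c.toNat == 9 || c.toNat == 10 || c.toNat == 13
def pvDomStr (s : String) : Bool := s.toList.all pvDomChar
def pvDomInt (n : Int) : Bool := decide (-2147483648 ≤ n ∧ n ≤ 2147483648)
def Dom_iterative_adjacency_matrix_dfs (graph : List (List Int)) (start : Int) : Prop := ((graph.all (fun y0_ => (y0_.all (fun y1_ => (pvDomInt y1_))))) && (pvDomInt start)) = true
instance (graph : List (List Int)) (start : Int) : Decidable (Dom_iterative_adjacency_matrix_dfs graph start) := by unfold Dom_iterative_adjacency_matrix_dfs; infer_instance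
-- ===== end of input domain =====

-- B replaces the explicit-stack DFS with n rounds of one-step set expansion (bounded
-- fixed-point iteration) of the reachable set; same sorted result (objective: alternative).

-- shared helpers: both Pythons literally contain `range(n)` and `graph[v][u] == 1`
def pvRange (n : Nat) : List Int := (List.range n).map (fun i => (i : Int))

-- graph[v][u] == 1 (negative v wraps as in Python; out-of-range access — excluded by Pre_ — reads as "no edge")
def pvEdge (graph : List (List Int)) (v u : Int) : Bool :=
  PySem.List.pyGet? ((PySem.List.pyGet? graph v).getD []) u == some 1

theorem mem_pvRange (n : Nat) (x : Int) : x ∈ pvRange n ↔ 0 ≤ x ∧ x < (n : Int) := by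
  simp [pvRange]
  constructor
  · rintro ⟨i, hi, rfl⟩; omega
  · rintro ⟨h0, hn⟩; exact ⟨x.toNat, by omega, by omega⟩

-- ===== PORT A =====
-- the while-loop; stack is kept top-first (Python pops from the end, so the pushes of one
-- visit are prepended in reverse range order); the invariant argument hs only serves termination
def pvCand (graph : List (List Int)) (start : Int) : Finset Int :=
  insert start ((Finset.range graph.length).image (fun i => ((i : Nat) : Int)))

def dfsALoop (graph : List (List Int)) (start : Int) (visited : PySem.Set Int)
    (stack result : List Int)
    (hs : ∀ v ∈ stack, v = start ∨ (0 ≤ v ∧ v < (graph.length : Int))) : List Int :=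
  match stack with
  | [] => result
  | v :: rest =>
    if PySem.Set.contains visited v then
      dfsALoop graph start visited rest result
        (fun x hx => hs x (List.mem_cons_of_mem v hx))
    else
      dfsALoop graph start (PySem.Set.add visited v)
        (((pvRange graph.length).filter
            (fun u => pvEdge graph v u && !(PySem.Set.contains (PySem.Set.add visited v) u))).reverse
          ++ rest)
        (result ++ [v])
        (by
          intro x hx
          rcases List.mem_append.1 hx with hx | hx
          · have := List.mem_filter.1 (List.mem_reverse.1 hx)
            right; exact (mem_pvRange _ _).1 this.1
          · exact hs x (List.mem_cons_of_mem v hx))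
termination_by
  ((pvCand graph start).filter (fun x => ¬ x ∈ visited)).card * (graph.length + 2) + stack.length
decreasing_by
  · simp
  · rename_i _ h
    have hv : ¬ v ∈ visited := by simpa [PySem.Set.contains_iff] using h
    have hvc : v ∈ pvCand graph start := by
      rcases hs v (List.mem_cons_self) with h1 | h1
      · simp [pvCand, h1]
      · simp only [pvCand, Finset.mem_insert, Finset.mem_image, Finset.mem_range]
        right; exact ⟨v.toNat, by omega, by omega⟩
    have herase : {x ∈ pvCand graph start | x ∉ PySem.Set.add visited v}
        = ({x ∈ pvCand graph start | x ∉ visited}).erase v := by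
      ext x
      simp only [Finset.mem_filter, Finset.mem_erase, PySem.Set.mem_add]
      tauto
    have hvmem : v ∈ {x ∈ pvCand graph start | x ∉ visited} := by
      simp [Finset.mem_filter, hvc, hv]
    have hcard : ({x ∈ pvCand graph start | x ∉ visited}).card
        = {x ∈ pvCand graph start | x ∉ PySem.Set.add visited v}.card + 1 := by
      rw [herase, Finset.card_erase_of_mem hvmem]
      have := Finset.card_pos.2 ⟨v, hvmem⟩
      omega
    have hpl : (List.filter (fun u => pvEdge graph v u && !(PySem.Set.contains (PySem.Set.add visited v) u)) (pvRange graph.length)).length ≤ graph.length := by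
      calc _ ≤ (pvRange graph.length).length := List.length_filter_le _ _
        _ = graph.length := by simp [pvRange]
    rw [hcard]
    simp only [List.length_append, List.length_reverse, List.length_cons]
    set c := {x ∈ pvCand graph start | x ∉ PySem.Set.add visited v}.card
    set p := (List.filter (fun u => pvEdge graph v u && !(PySem.Set.contains (PySem.Set.add visited v) u)) (pvRange graph.length)).length
    have : p ≤ graph.length := hpl
    nlinarith [Nat.zero_le c]

def iterative_adjacency_matrix_dfs (graph : List (List Int)) (start : Int) : List Int :=
  PySem.List.sorted
    (dfsALoop graph start PySem.Set.empty [start] []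
      (by intro v hv; left; simpa using hv))
    (fun x => x) false

-- ===== PORT B =====
-- one round: visited | {u for v in visited for u in range(n) if graph[v][u] == 1}
def bExpand (graph : List (List Int)) (visited : PySem.Set Int) : PySem.Set Int :=
  PySem.Set.union visited
    (visited.flatMap (fun v => (pvRange graph.length).filter (fun u => pvEdge graph v u)))

def iterative_adjacency_matrix_dfs_alt (graph : List (List Int)) (start : Int) : List Int :=
  let n := graph.length
  let visited := (List.range n).foldl (fun s _ => bExpand graph s) (PySem.Set.ofList [start])
  PySem.List.sorted visited (fun x => x) false

-- ===== PRECONDITION & SPEC =====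
-- Pre_ excludes exactly the inputs where Python indexing can raise: a start index out of
-- range of a nonempty matrix (IndexError on graph[start]) and matrices with a row shorter
-- than len(graph) (IndexError on graph[v][u] unless that row's vertex happens to be
-- unreachable — those rare returning inputs are excluded too, see the cite).
def Pre_iterative_adjacency_matrix_dfs (graph : List (List Int)) (start : Int) : Prop :=
  (graph = [] ∨ PySem.Raise.InRange graph.length start) ∧
    ∀ row ∈ graph, graph.length ≤ row.length

instance (graph : List (List Int)) (start : Int) : Decidable (Pre_iterative_adjacency_matrix_dfs graph start) := by unfold Pre_iterative_adjacency_matrix_dfs; infer_instance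

def pvWitness_iterative_adjacency_matrix_dfs : List (List Int) × Int :=
  ([[0, 1, 1], [1, 0, 1], [1, 1, 0]], 0)

def Spec_iterative_adjacency_matrix_dfs (graph : List (List Int)) (start : Int) (out : List Int) : Prop := out = iterative_adjacency_matrix_dfs_alt graph start
instance (graph : List (List Int)) (start : Int) (out : List Int) : Decidable (Spec_iterative_adjacency_matrix_dfs graph start out) := by unfold Spec_iterative_adjacency_matrix_dfs; infer_instance

-- ===== CLAIM (what is proved, stated in full; the proofs are below) =====
def Claim_equal_iterative_adjacency_matrix_dfs : Prop := ∀ (graph : List (List Int)) (start : Int), Dom_iterative_adjacency_matrix_dfs graph start → Pre_iterative_adjacency_matrix_dfs graph start → Spec_iterative_adjacency_matrix_dfs graph start (iterative_adjacency_matrix_dfs graph start)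

-- ===== LEMMAS AND PROOFS =====

-- the one-step edge relation both programs explore: u ranges over range(n), graph[v][u] == 1
def Stp (graph : List (List Int)) (v u : Int) : Prop :=
  u ∈ pvRange graph.length ∧ pvEdge graph v u = true

def Reach (graph : List (List Int)) (s v : Int) : Prop :=
  Relation.ReflTransGen (Stp graph) s v

theorem dfsA_sound (graph : List (List Int)) (start : Int) (visited : PySem.Set Int)
    (stack result : List Int) (hs : ∀ v ∈ stack, v = start ∨ (0 ≤ v ∧ v < (graph.length : Int)))
    (hr : ∀ a ∈ result, Reach graph start a)
    (hk : ∀ v ∈ stack, Reach graph start v) :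
    ∀ a ∈ dfsALoop graph start visited stack result hs, Reach graph start a := by
  revert hr hk
  fun_induction dfsALoop graph start visited stack result hs with
  | case1 vis res hs _ => intro hr hk a ha; exact hr a ha
  | case2 vis res v rest hs hc _ ih =>
    intro hr hk
    exact ih hr (fun x hx => hk x (List.mem_cons_of_mem v hx))
  | case3 vis res v rest hs hc _ ih =>
    intro hr hk
    apply ih
    · intro a ha
      rcases List.mem_append.1 ha with ha | ha
      · exact hr a ha
      · rw [show a = v from by simpa using ha]; exact hk v List.mem_cons_self
    · intro x hx
      rcases List.mem_append.1 hx with hx | hx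
      · have hf := List.mem_filter.1 (List.mem_reverse.1 hx)
        have hf2 := hf.2
        simp only [Bool.and_eq_true] at hf2
        have hstep : Stp graph v x := ⟨hf.1, hf2.1⟩
        exact Relation.ReflTransGen.tail (hk v List.mem_cons_self) hstep
      · exact hk x (List.mem_cons_of_mem v hx)
theorem dfsA_complete (graph : List (List Int)) (start : Int) (visited : PySem.Set Int)
    (stack result : List Int) (hs : ∀ v ∈ stack, v = start ∨ (0 ≤ v ∧ v < (graph.length : Int)))
    (hres : ∀ a, a ∈ result ↔ a ∈ visited)
    (hcl : ∀ x ∈ visited, ∀ u, Stp graph x u → u ∈ visited ∨ u ∈ stack) :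
    (∀ v ∈ stack, v ∈ dfsALoop graph start visited stack result hs) ∧
    (∀ x ∈ visited, x ∈ dfsALoop graph start visited stack result hs) ∧
    (∀ x ∈ dfsALoop graph start visited stack result hs, ∀ u, Stp graph x u →
        u ∈ dfsALoop graph start visited stack result hs) := by
  revert hres hcl
  fun_induction dfsALoop graph start visited stack result hs with
  | case1 vis res hs _ =>
    intro hres hcl
    refine ⟨by simp, fun x hx => (hres x).2 hx, fun x hx u hu => ?_⟩
    rcases hcl x ((hres x).1 hx) u hu with h | h
    · exact (hres u).2 h
    · simp at h
  | case2 vis res v rest hs hc _ ih =>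
    intro hres hcl
    have hv : v ∈ vis := by simpa [PySem.Set.contains_iff] using hc
    have hcl' : ∀ x ∈ vis, ∀ u, Stp graph x u → u ∈ vis ∨ u ∈ rest := by
      intro x hx u hu
      rcases hcl x hx u hu with h | h
      · exact Or.inl h
      · rcases List.mem_cons.1 h with h | h
        · exact Or.inl (h ▸ hv)
        · exact Or.inr h
    obtain ⟨h1, h2, h3⟩ := ih hres hcl'
    exact ⟨fun x hx => by
        rcases List.mem_cons.1 hx with h | h
        · exact h ▸ h2 v hv
        · exact h1 x h, h2, h3⟩
  | case3 vis res v rest hs hc _ ih =>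
    intro hres hcl
    have hres' : ∀ a, a ∈ res ++ [v] ↔ a ∈ PySem.Set.add vis v := by
      intro a
      simp only [List.mem_append, List.mem_singleton, PySem.Set.mem_add, hres a]
    have hcl' : ∀ x ∈ PySem.Set.add vis v, ∀ u, Stp graph x u →
        u ∈ PySem.Set.add vis v ∨
          u ∈ (List.filter (fun u => pvEdge graph v u && !(PySem.Set.contains (PySem.Set.add vis v) u)) (pvRange graph.length)).reverse ++ rest := by
      intro x hx u hu
      rcases (PySem.Set.mem_add _ _ _).1 hx with hx | hx
      · rcases hcl x hx u hu with h | h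
        · exact Or.inl ((PySem.Set.mem_add _ _ _).2 (Or.inl h))
        · rcases List.mem_cons.1 h with h | h
          · exact Or.inl ((PySem.Set.mem_add _ _ _).2 (Or.inr h))
          · exact Or.inr (List.mem_append.2 (Or.inr h))
      · rw [hx] at hu
        by_cases hm : u ∈ PySem.Set.add vis v
        · exact Or.inl hm
        · refine Or.inr (List.mem_append.2 (Or.inl (List.mem_reverse.2 (List.mem_filter.2 ⟨hu.1, ?_⟩))))
          simp only [Bool.and_eq_true, Bool.not_eq_true']
          exact ⟨hu.2, by simpa [PySem.Set.contains_iff] using hm⟩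
    obtain ⟨h1, h2, h3⟩ := ih hres' hcl'
    refine ⟨fun x hx => ?_, fun x hx => h2 x ((PySem.Set.mem_add _ _ _).2 (Or.inl hx)), h3⟩
    rcases List.mem_cons.1 hx with h | h
    · subst h; exact h2 _ ((PySem.Set.mem_add _ _ _).2 (Or.inr rfl))
    · exact h1 x (List.mem_append.2 (Or.inr h))
theorem dfsA_nodup (graph : List (List Int)) (start : Int) (visited : PySem.Set Int)
    (stack result : List Int) (hs : ∀ v ∈ stack, v = start ∨ (0 ≤ v ∧ v < (graph.length : Int)))
    (hres : ∀ a, a ∈ result ↔ a ∈ visited) (hnd : result.Nodup) :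
    (dfsALoop graph start visited stack result hs).Nodup := by
  revert hres hnd
  fun_induction dfsALoop graph start visited stack result hs with
  | case1 vis res hs _ => intro _ hnd; exact hnd
  | case2 vis res v rest hs hc _ ih => intro hres hnd; exact ih hres hnd
  | case3 vis res v rest hs hc _ ih =>
    intro hres hnd
    apply ih
    · intro a
      simp only [List.mem_append, List.mem_singleton, PySem.Set.mem_add, hres a]
    · have hcv : v ∉ vis := by simpa [PySem.Set.contains_iff] using hc
      have hv : v ∉ res := fun h => hcv ((hres v).1 h)
      simpa [List.nodup_append] using ⟨hnd, fun a ha hav => hv (hav ▸ ha)⟩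
theorem mem_bExpand (graph : List (List Int)) (s : PySem.Set Int) (a : Int) :
    a ∈ bExpand graph s ↔ a ∈ s ∨ ∃ v ∈ s, Stp graph v a := by
  simp [bExpand, PySem.Set.mem_union, List.mem_flatMap, List.mem_filter, Stp]

theorem nodup_bExpand (graph : List (List Int)) (s : PySem.Set Int) (h : s.Nodup) :
    (bExpand graph s).Nodup := PySem.Set.nodup_union _ _ h

theorem foldl_const_fun {α β : Type} (f : α → α) (l : List β) (i : α) :
    l.foldl (fun s _ => f s) i = f^[l.length] i := by
  induction l generalizing i with
  | nil => rfl
  | cons x t ih => simp [List.foldl_cons, ih, Function.iterate_succ_apply]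

theorem bIter_succ (graph : List (List Int)) (s0 : PySem.Set Int) (k : Nat) :
    (bExpand graph)^[k+1] s0 = bExpand graph ((bExpand graph)^[k] s0) :=
  Function.iterate_succ_apply' _ _ _

theorem bIter_mono (graph : List (List Int)) (s0 : PySem.Set Int) (k : Nat) (a : Int)
    (h : a ∈ (bExpand graph)^[k] s0) : a ∈ (bExpand graph)^[k+1] s0 := by
  rw [bIter_succ]; exact (mem_bExpand _ _ _).2 (Or.inl h)

theorem bIter_mono_le (graph : List (List Int)) (s0 : PySem.Set Int) {k m : Nat} (hkm : k ≤ m)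
    (a : Int) (h : a ∈ (bExpand graph)^[k] s0) : a ∈ (bExpand graph)^[m] s0 := by
  induction m, hkm using Nat.le_induction with
  | base => exact h
  | succ m hm ih => exact bIter_mono _ _ _ _ ih

theorem bIter_nodup (graph : List (List Int)) (s0 : PySem.Set Int) (h0 : s0.Nodup) (k : Nat) :
    ((bExpand graph)^[k] s0).Nodup := by
  induction k with
  | zero => exact h0
  | succ k ih => rw [bIter_succ]; exact nodup_bExpand _ _ ih

theorem bIter_sound (graph : List (List Int)) (start : Int) (k : Nat) (a : Int)
    (h : a ∈ (bExpand graph)^[k] (PySem.Set.ofList [start])) : Reach graph start a := by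
  induction k generalizing a with
  | zero => simp [PySem.Set.ofList] at h; exact h ▸ Relation.ReflTransGen.refl
  | succ k ih =>
    rw [bIter_succ] at h
    rcases (mem_bExpand _ _ _).1 h with h | ⟨v, hv, hstep⟩
    · exact ih a h
    · exact Relation.ReflTransGen.tail (ih v hv) hstep

theorem bExpand_congr (graph : List (List Int)) (s t : PySem.Set Int)
    (h : ∀ x, x ∈ s ↔ x ∈ t) (x : Int) : x ∈ bExpand graph s ↔ x ∈ bExpand graph t := by
  simp only [mem_bExpand]
  constructor
  · rintro (hx | ⟨v, hv, hs⟩)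
    · exact Or.inl ((h x).1 hx)
    · exact Or.inr ⟨v, (h v).1 hv, hs⟩
  · rintro (hx | ⟨v, hv, hs⟩)
    · exact Or.inl ((h x).2 hx)
    · exact Or.inr ⟨v, (h v).2 hv, hs⟩

theorem bIter_stable (graph : List (List Int)) (s0 : PySem.Set Int) (k : Nat)
    (hst : ∀ x, x ∈ (bExpand graph)^[k] s0 ↔ x ∈ (bExpand graph)^[k+1] s0)
    {m : Nat} (hkm : k ≤ m) :
    ∀ x, x ∈ (bExpand graph)^[m] s0 ↔ x ∈ (bExpand graph)^[k] s0 := by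
  induction m, hkm using Nat.le_induction with
  | base => exact fun x => Iff.rfl
  | succ m hm ih =>
    intro x
    rw [bIter_succ]
    calc x ∈ bExpand graph ((bExpand graph)^[m] s0)
        ↔ x ∈ bExpand graph ((bExpand graph)^[k] s0) := bExpand_congr _ _ _ ih x
      _ ↔ x ∈ (bExpand graph)^[k+1] s0 := by rw [bIter_succ]
      _ ↔ x ∈ (bExpand graph)^[k] s0 := (hst x).symm

theorem bIter_sub_cand (graph : List (List Int)) (start : Int) (k : Nat) (a : Int)
    (h : a ∈ (bExpand graph)^[k] (PySem.Set.ofList [start])) : a ∈ pvCand graph start := by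
  induction k generalizing a with
  | zero => simp [PySem.Set.ofList] at h; simp [pvCand, h]
  | succ k ih =>
    rw [bIter_succ] at h
    rcases (mem_bExpand _ _ _).1 h with h | ⟨v, hv, hstep⟩
    · exact ih a h
    · have := (mem_pvRange _ _).1 hstep.1
      simp only [pvCand, Finset.mem_insert, Finset.mem_image, Finset.mem_range]
      right; exact ⟨a.toNat, by omega, by omega⟩

theorem card_pvCand_le (graph : List (List Int)) (start : Int) :
    (pvCand graph start).card ≤ graph.length + 1 := by
  calc (pvCand graph start).card
      ≤ ((Finset.range graph.length).image (fun i => ((i : Nat) : Int))).card + 1 :=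
        Finset.card_insert_le _ _
    _ ≤ graph.length + 1 := by
        have h := Finset.card_image_le (s := Finset.range graph.length) (f := fun i => ((i : Nat) : Int))
        simp at h; omega
theorem bIter_closed (graph : List (List Int)) (start : Int) :
    ∀ x ∈ (bExpand graph)^[graph.length] (PySem.Set.ofList [start]), ∀ u, Stp graph x u →
      u ∈ (bExpand graph)^[graph.length] (PySem.Set.ofList [start]) := by
  set n := graph.length with hn
  set s0 : PySem.Set Int := PySem.Set.ofList [start] with hs0
  by_cases hex : ∃ k, k < n ∧ ∀ x, x ∈ (bExpand graph)^[k] s0 ↔ x ∈ (bExpand graph)^[k+1] s0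
  · obtain ⟨k, hk, hst⟩ := hex
    have hmem := bIter_stable graph s0 k hst (le_of_lt hk)
    intro x hx u hu
    have hxk : x ∈ (bExpand graph)^[k] s0 := (hmem x).1 hx
    have hu1 : u ∈ (bExpand graph)^[k+1] s0 := by
      rw [bIter_succ]
      exact (mem_bExpand _ _ _).2 (Or.inr ⟨x, hxk, hu⟩)
    exact (hmem u).2 ((hst u).2 hu1)
  · push_neg at hex
    have hgrow : ∀ k, k < n →
        ∃ x, x ∈ (bExpand graph)^[k+1] s0 ∧ x ∉ (bExpand graph)^[k] s0 := by
      intro k hk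
      obtain ⟨x, hx⟩ := hex k hk
      have hsub := bIter_mono graph s0 k x
      exact ⟨x, by tauto⟩
    have hcard : ∀ k, k ≤ n → k + 1 ≤ ((bExpand graph)^[k] s0).toFinset.card := by
      intro k
      induction k with
      | zero => intro _; simp [hs0, PySem.Set.ofList]
      | succ k ih =>
        intro hk1
        obtain ⟨x, hx1, hx0⟩ := hgrow k (by omega)
        have hss : ((bExpand graph)^[k] s0).toFinset ⊂ ((bExpand graph)^[k+1] s0).toFinset := by
          constructor
          · intro a ha
            simp only [List.mem_toFinset] at ha ⊢
            exact bIter_mono _ _ _ _ ha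
          · intro hcontra
            exact hx0 (by simpa using hcontra (by simpa using hx1))
        have h1 := Finset.card_lt_card hss
        have h2 := ih (by omega)
        omega
    have hsubT : ((bExpand graph)^[n] s0).toFinset ⊆ pvCand graph start := by
      intro a ha
      exact bIter_sub_cand graph start n a (by simpa using ha)
    have heq : ((bExpand graph)^[n] s0).toFinset = pvCand graph start := by
      apply Finset.eq_of_subset_of_card_le hsubT
      have h1 := hcard n (le_refl n)
      have h2 := card_pvCand_le graph start
      omega
    intro x hx u hu
    have hucand : u ∈ pvCand graph start := by
      have := (mem_pvRange _ _).1 hu.1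
      simp only [pvCand, Finset.mem_insert, Finset.mem_image, Finset.mem_range]
      right; exact ⟨u.toNat, by omega, by omega⟩
    have hfin : u ∈ ((bExpand graph)^[n] s0).toFinset := heq ▸ hucand
    simpa using hfin
theorem reach_mem_of_closed (graph : List (List Int)) (start : Int) (L : List Int)
    (hstart : start ∈ L) (hcl : ∀ x ∈ L, ∀ u, Stp graph x u → u ∈ L) :
    ∀ a, Reach graph start a → a ∈ L := by
  intro a h
  induction h with
  | refl => exact hstart
  | tail hbc hstep ih => exact hcl _ ih _ hstep

theorem dfs_eq_alt : ∀ (graph : List (List Int)) (start : Int),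
    iterative_adjacency_matrix_dfs graph start = iterative_adjacency_matrix_dfs_alt graph start := by
  intro graph start
  unfold iterative_adjacency_matrix_dfs
  simp only [iterative_adjacency_matrix_dfs_alt]
  rw [foldl_const_fun (bExpand graph) (List.range graph.length)]
  simp only [List.length_range]
  set hs : ∀ v ∈ [start], v = start ∨ (0 ≤ v ∧ v < (graph.length : Int)) :=
    (by intro v hv; left; simpa using hv) with hhs
  set LA := dfsALoop graph start PySem.Set.empty [start] [] hs with hLA
  set LB := (bExpand graph)^[graph.length] (PySem.Set.ofList [start]) with hLB
  have hres0 : ∀ a, a ∈ ([] : List Int) ↔ a ∈ PySem.Set.empty := by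
    intro a; simp [PySem.Set.empty]
  have hcl0 : ∀ x ∈ PySem.Set.empty, ∀ u, Stp graph x u → x ∈ PySem.Set.empty ∨ u ∈ [start] := by
    intro x hx; simp [PySem.Set.empty] at hx
  have hAsound : ∀ a ∈ LA, Reach graph start a := by
    apply dfsA_sound
    · intro a ha; simp at ha
    · intro v hv
      have : v = start := by simpa using hv
      exact this ▸ Relation.ReflTransGen.refl
  have hAc := dfsA_complete graph start PySem.Set.empty [start] [] hs hres0
    (by intro x hx; simp [PySem.Set.empty] at hx)
  have hAmem : ∀ a, a ∈ LA ↔ Reach graph start a := by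
    intro a
    constructor
    · exact hAsound a
    · exact reach_mem_of_closed graph start LA
        (hAc.1 start (by simp)) (fun x hx u hu => hAc.2.2 x hx u hu) a
  have hAnodup : LA.Nodup := dfsA_nodup graph start PySem.Set.empty [start] [] hs hres0 List.nodup_nil
  have hBmem : ∀ a, a ∈ LB ↔ Reach graph start a := by
    intro a
    constructor
    · exact bIter_sound graph start graph.length a
    · refine reach_mem_of_closed graph start LB ?_ (bIter_closed graph start) a
      exact bIter_mono_le graph _ (Nat.zero_le _) start (by simp [PySem.Set.ofList])
  have hBnodup : LB.Nodup := bIter_nodup graph _ (PySem.Set.nodup_ofList _) _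
  have hperm : LA.Perm LB :=
    (List.perm_ext_iff_of_nodup hAnodup hBnodup).2 (fun a => (hAmem a).trans (hBmem a).symm)
  exact PySem.List.sorted_eq_sorted_of_perm _ _ _ (fun a b h => h) hperm

-- ===== VERDICT (by name: the statement is the Claim_ definition above) =====
theorem iterative_adjacency_matrix_dfs_spec : Claim_equal_iterative_adjacency_matrix_dfs := by
  intro graph start _ _
  unfold Spec_iterative_adjacency_matrix_dfs
  exact dfs_eq_alt graph start
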